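-- pv_equiv track=rewrite | github.com/huangsam/systology | scripts/add_summary_description.py | extract_frontmatter_and_body
-- ===== SOURCE A (Python) =====
-- def extract_frontmatter_and_body(text: str):
--     lines = text.splitlines()
--     i = 0
--     while i < len(lines) and lines[i].strip() == "":
--         i += 1
--     if i < len(lines) and lines[i].strip() == "---":
--         j = i + 1
--         while j < len(lines) and lines[j].strip() != "---":
--             j += 1
--         if j >= len(lines):
--             return None, text
--         fm_lines = lines[i + 1 : j]
--         body_lines = lines[j + 1 :]
--         return fm_lines, body_lines
--     return None, lines[i:]
-- ===== SOURCE B (Python) =====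
-- def extract_frontmatter_and_body(text: str):
--     lines = text.splitlines()
--     marks = [k for k, l in enumerate(lines) if l.strip() == "---"]
--     i = next((k for k, l in enumerate(lines) if l.strip() != ""), len(lines))
--     if marks and marks[0] == i:
--         if len(marks) >= 2:
--             return lines[i + 1 : marks[1]], lines[marks[1] + 1 :]
--         return None, text
--     return None, lines[i:]
-- ===== Notes on version B (the rewrite author's own statement) =====
-- stated objective: alternative
-- what changed: A walks two index-based while loops (skip blanks, then scan forward for the closing '---'); B instead builds the full list of delimiter positions in one enumerate pass plus a first-non-blank search and decides every case by inspecting that list's first two entries.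
-- outside the precondition, e.g. on extract_frontmatter_and_body('---\nx'): A returns (None, '---\nx'), B returns (None, '---\nx'); on extract_frontmatter_and_body('---'): A returns (None, '---'), B returns (None, '---')
import Mathlib
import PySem

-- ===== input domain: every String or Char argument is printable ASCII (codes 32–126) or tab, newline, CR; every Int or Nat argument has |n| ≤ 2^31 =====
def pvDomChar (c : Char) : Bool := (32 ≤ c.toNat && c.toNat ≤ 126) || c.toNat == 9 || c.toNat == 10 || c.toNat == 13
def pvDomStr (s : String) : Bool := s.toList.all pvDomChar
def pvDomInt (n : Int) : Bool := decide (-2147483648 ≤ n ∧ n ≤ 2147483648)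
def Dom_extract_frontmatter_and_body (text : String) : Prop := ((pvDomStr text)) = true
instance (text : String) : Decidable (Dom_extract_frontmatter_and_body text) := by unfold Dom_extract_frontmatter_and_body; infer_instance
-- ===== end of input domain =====

-- B replaces A's two index-walking while loops by a one-shot list of delimiter positions
-- plus a first-non-blank search (objective: alternative decomposition, same cost).
-- The unclosed-frontmatter case, where Python returns the raw string (not a list), is outside Pre_.

-- ===== PORT A =====
-- 'while i < len(lines) and lines[i].strip() == "": i += 1' — number of leading blank lines
def pvSkipBlanks : List String → Nat
  | [] => 0
  | l :: ls => if PySem.Str.strip l == "" then pvSkipBlanks ls + 1 else 0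

-- 'while j < len(lines) and lines[j].strip() != "---": j += 1' — offset of first "---" in the suffix
def pvFindMark : List String → Option Nat
  | [] => none
  | l :: ls => if PySem.Str.strip l == "---" then some 0 else (pvFindMark ls).map (· + 1)

def extract_frontmatter_and_body (text : String) : Option (List String) × List String :=
  let lines := PySem.Str.splitlines text
  let i := pvSkipBlanks lines
  if (PySem.List.pyGet? lines (i : Int)).elim false (fun l => PySem.Str.strip l == "---") then
    match pvFindMark (lines.drop (i + 1)) with
    | none =>
        -- Python: 'return None, text' — the raw string, not a list; this input is excluded by Pre_
        (none, [text])
    | some k =>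
        let j := i + 1 + k
        (some (PySem.List.slice lines (some ((i : Int) + 1)) (some (j : Int))),
         PySem.List.slice lines (some ((j : Int) + 1)) none)
  else
    (none, lines.drop i)

-- ===== PORT B =====
def extract_frontmatter_and_body_alt (text : String) : Option (List String) × List String :=
  let lines := PySem.Str.splitlines text
  let marks := ((PySem.List.enumerate lines 0).filter (fun p => PySem.Str.strip p.2 == "---")).map (·.1)
  let i : Int := ((PySem.List.enumerate lines 0).find? (fun p => !(PySem.Str.strip p.2 == ""))).elim
      (lines.length : Int) (·.1)
  match marks with
  | m0 :: rest =>
    if m0 = i then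
      match rest with
      | m1 :: _ =>
          (some (PySem.List.slice lines (some (i + 1)) (some m1)),
           PySem.List.slice lines (some (m1 + 1)) none)
      | [] =>
          -- Python: 'return None, text' — the raw string, not a list; this input is excluded by Pre_
          (none, [text])
    else (none, PySem.List.slice lines (some i) none)
  | [] => (none, PySem.List.slice lines (some i) none)

-- ===== PRECONDITION & SPEC =====
-- Pre_ excludes exactly the texts whose first non-blank line is a '---' delimiter that is never
-- closed by a second '---': there Python A returns (None, text) with text a raw string — not a
-- value of the declared type tuple[Optional[list[str]], list[str]] — so no Lean value can match it.
def Pre_extract_frontmatter_and_body (text : String) : Prop :=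
  let ls := (PySem.Str.splitlines text).dropWhile (fun l => PySem.Str.strip l == "")
  ¬ (ls.head?.elim false (fun l => PySem.Str.strip l == "---") = true ∧
     ls.tail.all (fun l => !(PySem.Str.strip l == "---")) = true)
instance (text : String) : Decidable (Pre_extract_frontmatter_and_body text) := by
  unfold Pre_extract_frontmatter_and_body; infer_instance

def pvWitness_extract_frontmatter_and_body : String := "---\ntitle: x\n---\nbody"

def Spec_extract_frontmatter_and_body (text : String) (out : Option (List String) × List String) : Prop := out = extract_frontmatter_and_body_alt text
instance (text : String) (out : Option (List String) × List String) : Decidable (Spec_extract_frontmatter_and_body text out) := by unfold Spec_extract_frontmatter_and_body; infer_instance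

-- ===== CLAIM (what is proved, stated in full; the proofs are below) =====
def Claim_equal_extract_frontmatter_and_body : Prop := ∀ (text : String), Dom_extract_frontmatter_and_body text → Pre_extract_frontmatter_and_body text → Spec_extract_frontmatter_and_body text (extract_frontmatter_and_body text)

-- ===== LEMMAS AND PROOFS =====

-- proof-side name for B's delimiter-index list, with a general start offset
def pvMarksOf (s : Int) (L : List String) : List Int :=
  ((PySem.List.enumerate L s).filter (fun p => PySem.Str.strip p.2 == "---")).map (·.1)

theorem pvMarksOf_nil (s : Int) : pvMarksOf s [] = [] := by
  simp [pvMarksOf, PySem.List.enumerate_nil]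

theorem pvMarksOf_cons (s : Int) (l : String) (ls : List String) :
    pvMarksOf s (l :: ls) =
      if PySem.Str.strip l == "---" then s :: pvMarksOf (s + 1) ls else pvMarksOf (s + 1) ls := by
  simp [pvMarksOf, PySem.List.enumerate_cons, List.filter_cons]
  split_ifs <;> simp

theorem pvMarksOf_ge (s : Int) (L : List String) : ∀ m ∈ pvMarksOf s L, s ≤ m := by
  induction L generalizing s with
  | nil => simp [pvMarksOf_nil]
  | cons l ls ih =>
    intro m hm
    rw [pvMarksOf_cons] at hm
    split_ifs at hm with h
    · rcases List.mem_cons.1 hm with rfl | hm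
      · exact le_refl m
      · exact le_trans (by omega) (ih (s + 1) m hm)
    · exact le_trans (by omega) (ih (s + 1) m hm)

theorem pvMarksOf_head (s : Int) (L : List String) :
    (pvMarksOf s L).head? = (pvFindMark L).map (fun k => s + (k : Int)) := by
  induction L generalizing s with
  | nil => simp [pvMarksOf_nil, pvFindMark]
  | cons l ls ih =>
    rw [pvMarksOf_cons]
    by_cases h : (PySem.Str.strip l == "---") = true
    · simp [h, pvFindMark]
    · rw [if_neg h, ih (s + 1)]
      simp only [pvFindMark, h, if_false, Bool.false_eq_true]
      cases pvFindMark ls <;> simp [Option.map_map] <;> push_cast <;> ring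

theorem pvMarksOf_nil_iff (s : Int) (L : List String) :
    pvMarksOf s L = [] ↔ pvFindMark L = none := by
  constructor
  · intro h
    have := pvMarksOf_head s L
    rw [h] at this
    cases hf : pvFindMark L <;> simp [hf] at this ⊢
  · intro h
    have := pvMarksOf_head s L
    rw [h] at this
    cases hL : pvMarksOf s L <;> simp [hL] at this ⊢

-- B's first-non-blank index equals A's blank-skipping loop counter
theorem pvFind_eq_skip (L : List String) (s : Int) :
    (((PySem.List.enumerate L s).find? (fun p => !(PySem.Str.strip p.2 == ""))).elim
        (s + (L.length : Int)) (·.1)) = s + (pvSkipBlanks L : Int) := by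
  induction L generalizing s with
  | nil => simp [PySem.List.enumerate_nil, pvSkipBlanks]
  | cons l ls ih =>
    rw [PySem.List.enumerate_cons, List.find?_cons]
    by_cases h : (PySem.Str.strip l == "") = true
    · simp only [h, Bool.not_true, pvSkipBlanks, List.length_cons]
      push_cast
      have := ih (s + 1)
      rw [show s + ((ls.length : Int) + 1) = s + 1 + (ls.length : Int) by ring, this]
      ring
    · simp [h, pvSkipBlanks]

theorem pvSkipBlanks_le (L : List String) : pvSkipBlanks L ≤ L.length := by
  induction L with
  | nil => simp [pvSkipBlanks]
  | cons l ls ih => simp only [pvSkipBlanks]; split_ifs <;> simp <;> omega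

-- all skipped lines are blank, so they contribute no marks
theorem pvMarksOf_skip (L : List String) (s : Int) :
    pvMarksOf s L = pvMarksOf (s + (pvSkipBlanks L : Int)) (L.drop (pvSkipBlanks L)) := by
  induction L generalizing s with
  | nil => simp [pvSkipBlanks]
  | cons l ls ih =>
    by_cases h : (PySem.Str.strip l == "") = true
    · have hne : (PySem.Str.strip l == "---") = false := by
        have : PySem.Str.strip l = "" := by
          have := h; exact eq_of_beq this
        simp [this]
      simp only [pvSkipBlanks, if_pos h, pvMarksOf_cons, hne, List.drop_succ_cons]
      rw [ih (s + 1)]; congr 1; push_cast; ring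
    · simp [pvSkipBlanks, h]

-- total agreement of the two ports (the excluded unclosed case hits matching placeholders)
theorem pv_ports_eq (text : String) :
    extract_frontmatter_and_body text = extract_frontmatter_and_body_alt text := by
  unfold extract_frontmatter_and_body extract_frontmatter_and_body_alt
  simp only []
  set L := PySem.Str.splitlines text with hL
  set i := pvSkipBlanks L with hi
  have hfind := pvFind_eq_skip L 0
  rw [zero_add, zero_add, ← hi] at hfind
  have hmarks : ((PySem.List.enumerate L 0).filter (fun p => PySem.Str.strip p.2 == "---")).map (·.1)
      = pvMarksOf 0 L := rfl
  have hskip : pvMarksOf 0 L = pvMarksOf (i : Int) (L.drop i) := by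
    have := pvMarksOf_skip L 0
    rwa [zero_add] at this
  have hget : PySem.List.pyGet? L (i : Int) = L[i]? := by
    simp [PySem.List.pyGet?_natCast]
  rw [hmarks, hfind, hskip, hget]
  cases hdrop : L.drop i with
  | nil =>
    have hnone : L[i]? = none := by
      rw [← List.head?_drop, hdrop]; rfl
    have hle := pvSkipBlanks_le L
    rw [← hi] at hle
    have h2 := congrArg List.length hdrop
    simp only [List.length_drop, List.length_nil] at h2
    rw [hnone, pvMarksOf_nil]
    have hsl : PySem.List.slice L (some (i : Int)) none = L.drop i := by
      simp [PySem.List.slice_from_natCast]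
    simp [hsl, hdrop]
  | cons l tl =>
    have hhead : L[i]? = some l := by
      rw [← List.head?_drop, hdrop]; rfl
    have htl : tl = L.drop (i + 1) := by
      have hdd : L.drop (i + 1) = (L.drop i).tail := by
        rw [← List.drop_drop]; simp
      rw [hdd, hdrop]; rfl
    rw [hhead, pvMarksOf_cons]
    by_cases hm : (PySem.Str.strip l == "---") = true
    · -- frontmatter opens at line i
      rw [if_pos hm]
      simp only [hm, Option.elim, if_true]
      have hrest := pvMarksOf_head ((i : Int) + 1) tl
      rw [htl] at hrest
      cases hfm : pvFindMark (L.drop (i + 1)) with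
      | none =>
        have hml : pvMarksOf ((i : Int) + 1) (L.drop (i + 1)) = [] := by
          rw [pvMarksOf_nil_iff]; exact hfm
        rw [htl, hml]
      | some k =>
        have hh : (pvMarksOf ((i : Int) + 1) (L.drop (i + 1))).head?
            = some ((i : Int) + 1 + (k : Int)) := by
          rw [hrest, hfm]; simp
        rw [htl]
        cases hml : pvMarksOf ((i : Int) + 1) (L.drop (i + 1)) with
        | nil => rw [hml] at hh; simp at hh
        | cons m1 ms =>
          rw [hml] at hh
          simp only [List.head?_cons, Option.some.injEq] at hh
          subst hh
          simp only [Prod.mk.injEq]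
          push_cast
          constructor <;> rfl
    · -- first non-blank line is not '---'
      rw [if_neg hm]
      simp only [hm, Option.elim]
      have hge := pvMarksOf_ge ((i : Int) + 1) tl
      rw [htl] at hge
      have hsl : PySem.List.slice L (some (i : Int)) none = L.drop i := by
        simp [PySem.List.slice_from_natCast]
      cases hml : pvMarksOf ((i : Int) + 1) (L.drop (i + 1)) with
      | nil =>
        rw [htl, hml]
        simp only [hsl]
        rw [← htl]
        exact congrArg (fun x => ((none : Option (List String)), x)) hdrop.symm
      | cons m0 ms =>
        rw [htl, hml]
        have hm0 : (i : Int) + 1 ≤ m0 := by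
          apply hge; rw [hml]; exact List.mem_cons_self
        have hne : ¬ (m0 = (i : Int)) := by omega
        simp only [if_neg hne, hsl]
        rw [← htl]
        exact congrArg (fun x => ((none : Option (List String)), x)) hdrop.symm

-- ===== VERDICT (by name: the statement is the Claim_ definition above) =====
theorem extract_frontmatter_and_body_spec : Claim_equal_extract_frontmatter_and_body := by
  intro text _ _
  unfold Spec_extract_frontmatter_and_body
  exact pv_ports_eq text
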